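-- pv_equiv track=rewrite | github.com/eliffakgunn/CSE321-Introduction-to-Algorithm-Design | hw5/1801042251.py | costOfOptimalPlan
-- ===== SOURCE A (Python) =====
-- def costOfOptimalPlan(NY,SF,M,n):
-- 	costNY=NY[0] #if plan begins NY
-- 	costSF=SF[0] #if plan begins SF
-- 	costNY_temp=costNY #this variable for comparing after the costNY change
--
-- 	#in for loop, for every iteration, whichever path is shorter selects that path
-- 	#it decides which way it should come to the next index
-- 	for i in range(1,n):
-- 		costNY=NY[i]+min(costNY,costSF+M)
-- 		costSF=SF[i]+min(costSF,costNY_temp+M)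
-- 		costNY_temp=costNY
--
-- 	optimalPlan=min(costNY, costSF)
-- 	return optimalPlan
-- ===== SOURCE B (Python) =====
-- def costOfOptimalPlan(NY, SF, M, n):
--     ny0, sf0 = NY[0], SF[0]
--     if n <= 1:
--         return min(ny0, sf0)
--
--     def day(i):
--         # (min-plus) transition matrix of day i: rows = new location, cols = old
--         return (NY[i], NY[i] + M, SF[i] + M, SF[i])
--
--     def mul(P, Q):
--         # min-plus 2x2 matrix product P*Q
--         a, b, c, d = P
--         e, f, g, h = Q
--         return (min(a + e, b + g), min(a + f, b + h),
--                 min(c + e, d + g), min(c + f, d + h))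
--
--     def solve(lo, hi):
--         # product of the day matrices for days lo..hi-1 (latest day leftmost)
--         if hi - lo <= 1:
--             return day(lo)
--         mid = lo + (hi - lo) // 2
--         return mul(solve(mid, hi), solve(lo, mid))
--
--     a, b, c, d = solve(1, n)
--     return min(min(a + ny0, b + sf0), min(c + ny0, d + sf0))
-- ===== Notes on version B (the rewrite author's own statement) =====
-- stated objective: alternative
-- what changed: Replaces the rolling two-accumulator forward DP loop by a divide-and-conquer product of 2x2 min-plus transition matrices (one per day), applied once to the day-0 cost vector.
import Mathlib
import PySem

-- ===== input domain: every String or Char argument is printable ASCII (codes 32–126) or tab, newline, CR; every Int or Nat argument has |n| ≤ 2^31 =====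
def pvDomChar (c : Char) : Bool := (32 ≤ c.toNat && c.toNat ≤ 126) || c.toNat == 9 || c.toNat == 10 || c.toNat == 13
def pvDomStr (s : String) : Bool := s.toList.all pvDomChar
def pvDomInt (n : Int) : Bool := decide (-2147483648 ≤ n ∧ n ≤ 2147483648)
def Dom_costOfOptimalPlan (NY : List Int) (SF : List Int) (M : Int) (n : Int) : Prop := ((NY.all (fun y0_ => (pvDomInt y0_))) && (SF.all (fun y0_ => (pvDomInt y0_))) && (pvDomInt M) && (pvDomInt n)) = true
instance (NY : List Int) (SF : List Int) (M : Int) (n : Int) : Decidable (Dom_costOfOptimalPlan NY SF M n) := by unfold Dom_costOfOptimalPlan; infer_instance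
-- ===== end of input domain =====

-- B replaces A's rolling two-accumulator forward DP loop by a divide-and-conquer
-- product of 2x2 min-plus day-transition matrices (objective: alternative algorithm, same cost).

-- ===== PORT A =====
def costOfOptimalPlan (NY : List Int) (SF : List Int) (M : Int) (n : Int) : Int :=
  let costNY := PySem.List.pyGetD NY 0 0      -- NY[0]
  let costSF := PySem.List.pyGetD SF 0 0      -- SF[0]
  let costNY_temp := costNY
  let s := (PySem.List.pyRange 1 n 1).foldl
    (fun (st : Int × Int × Int) i =>
      let costNY' := PySem.List.pyGetD NY i 0 + min st.1 (st.2.1 + M)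
      let costSF' := PySem.List.pyGetD SF i 0 + min st.2.1 (st.2.2 + M)
      (costNY', costSF', costNY'))
    (costNY, costSF, costNY_temp)
  min s.1 s.2.1

-- ===== PORT B =====
-- (min-plus) transition matrix of day i: rows = new location, cols = old
def pvDay (NY : List Int) (SF : List Int) (M : Int) (i : Int) : Int × Int × Int × Int :=
  (PySem.List.pyGetD NY i 0, PySem.List.pyGetD NY i 0 + M,
   PySem.List.pyGetD SF i 0 + M, PySem.List.pyGetD SF i 0)

-- min-plus 2x2 matrix product P*Q
def pvMul (P Q : Int × Int × Int × Int) : Int × Int × Int × Int :=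
  match P, Q with
  | (a, b, c, d), (e, f, g, h) =>
    (min (a + e) (b + g), min (a + f) (b + h),
     min (c + e) (d + g), min (c + f) (d + h))

-- termination helper for pvSolve: Python's '//2' (fdiv) agrees with Lean's '/' for divisor 2
theorem pvFdiv2 (a : Int) : Int.fdiv a 2 = a / 2 := by
  rw [Int.fdiv_eq_ediv]; norm_num

-- product of the day matrices for days lo..hi-1 (latest day leftmost)
def pvSolve (NY : List Int) (SF : List Int) (M : Int) (lo hi : Int) : Int × Int × Int × Int :=
  if hi - lo ≤ 1 then pvDay NY SF M lo
  else
    let mid := lo + PySem.Int.floordiv (hi - lo) 2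
    pvMul (pvSolve NY SF M mid hi) (pvSolve NY SF M lo mid)
  termination_by (hi - lo).toNat
  decreasing_by
    all_goals simp_all only [PySem.Int.floordiv, pvFdiv2]
    all_goals omega

def costOfOptimalPlan_alt (NY : List Int) (SF : List Int) (M : Int) (n : Int) : Int :=
  let ny0 := PySem.List.pyGetD NY 0 0
  let sf0 := PySem.List.pyGetD SF 0 0
  if n ≤ 1 then min ny0 sf0
  else
    let P := pvSolve NY SF M 1 n
    min (min (P.1 + ny0) (P.2.1 + sf0)) (min (P.2.2.1 + ny0) (P.2.2.2 + sf0))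

-- ===== PRECONDITION & SPEC =====
-- Exactly the inputs on which A returns (both lists nonempty and every index 1..n-1 in range);
-- outside, A raises IndexError on NY[0]/SF[0]/NY[i]/SF[i].
def Pre_costOfOptimalPlan (NY : List Int) (SF : List Int) (M : Int) (n : Int) : Prop :=
  NY ≠ [] ∧ SF ≠ [] ∧ n ≤ NY.length ∧ n ≤ SF.length
instance (NY : List Int) (SF : List Int) (M : Int) (n : Int) : Decidable (Pre_costOfOptimalPlan NY SF M n) := by unfold Pre_costOfOptimalPlan; infer_instance
def pvWitness_costOfOptimalPlan : List Int × List Int × Int × Int := ([3, 2, 6], [1, 4, 5], 5, 3)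

def Spec_costOfOptimalPlan (NY : List Int) (SF : List Int) (M : Int) (n : Int) (out : Int) : Prop := out = costOfOptimalPlan_alt NY SF M n
instance (NY : List Int) (SF : List Int) (M : Int) (n : Int) (out : Int) : Decidable (Spec_costOfOptimalPlan NY SF M n out) := by unfold Spec_costOfOptimalPlan; infer_instance

-- ===== CLAIM (what is proved, stated in full; the proofs are below) =====
def Claim_equal_costOfOptimalPlan : Prop := ∀ (NY : List Int) (SF : List Int) (M : Int) (n : Int), Dom_costOfOptimalPlan NY SF M n → Pre_costOfOptimalPlan NY SF M n → Spec_costOfOptimalPlan NY SF M n (costOfOptimalPlan NY SF M n)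

-- ===== LEMMAS AND PROOFS =====

-- action of a min-plus matrix on a cost vector
def pvAct (P : Int × Int × Int × Int) (v : Int × Int) : Int × Int :=
  (min (P.1 + v.1) (P.2.1 + v.2), min (P.2.2.1 + v.1) (P.2.2.2 + v.2))

theorem pvAct_mul (P Q : Int × Int × Int × Int) (v : Int × Int) :
    pvAct (pvMul P Q) v = pvAct P (pvAct Q v) := by
  obtain ⟨a, b, c, d⟩ := P; obtain ⟨e, f, g, h⟩ := Q; obtain ⟨x, y⟩ := v
  simp only [pvAct, pvMul, Prod.mk.injEq]
  constructor <;> omega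

-- forward evolution of the cost vector over days lo..hi-1 (the recurrence itself)
def pvEvolve (NY : List Int) (SF : List Int) (M : Int) (lo hi : Int) (v : Int × Int) : Int × Int :=
  (PySem.List.pyRange lo hi 1).foldl (fun v i => pvAct (pvDay NY SF M i) v) v

theorem pvEvolve_split (NY SF : List Int) (M : Int) (lo mid hi : Int) (v : Int × Int)
    (h1 : lo ≤ mid) (h2 : mid ≤ hi) :
    pvEvolve NY SF M lo hi v = pvEvolve NY SF M mid hi (pvEvolve NY SF M lo mid v) := by
  simp [pvEvolve, PySem.List.pyRange_one_append lo mid hi h1 h2, List.foldl_append]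

theorem pvEvolve_single (NY SF : List Int) (M : Int) (lo : Int) (v : Int × Int) :
    pvEvolve NY SF M lo (lo + 1) v = pvAct (pvDay NY SF M lo) v := by
  rw [pvEvolve, PySem.List.pyRange_one_cons (by omega),
      PySem.List.pyRange_one_eq_nil (by omega)]
  simp

-- the D&C matrix acts as the forward evolution
theorem pvSolve_act (NY SF : List Int) (M : Int) (lo hi : Int) (v : Int × Int) (h : lo < hi) :
    pvAct (pvSolve NY SF M lo hi) v = pvEvolve NY SF M lo hi v := by
  generalize hk : (hi - lo).toNat = k
  induction k using Nat.strong_induction_on generalizing lo hi v with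
  | _ k ih =>
    rw [pvSolve]
    by_cases hsm : hi - lo ≤ 1
    · have : hi = lo + 1 := by omega
      subst this
      simp [pvEvolve_single]
    · have h2 : (2:Int) ≤ hi - lo := by omega
      have hfd : PySem.Int.floordiv (hi - lo) 2 = (hi - lo) / 2 := by
        simp [PySem.Int.floordiv, pvFdiv2]
      simp only [hsm, if_false, hfd]
      set mid := lo + (hi - lo) / 2 with hmid
      have hlo : lo < mid := by omega
      have hhi : mid < hi := by omega
      rw [pvAct_mul,
          ih (mid - lo).toNat (by omega) lo mid v hlo rfl,
          ih (hi - mid).toNat (by omega) mid hi _ hhi rfl,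
          pvEvolve_split NY SF M lo mid hi v (by omega) (by omega)]

-- A's three-component loop state stays of the form (v.1, v.2, v.1) and tracks pvEvolve
theorem pvAloop (NY SF : List Int) (M : Int) (L : List Int) (x y : Int) :
    L.foldl
      (fun (st : Int × Int × Int) i =>
        let costNY' := PySem.List.pyGetD NY i 0 + min st.1 (st.2.1 + M)
        let costSF' := PySem.List.pyGetD SF i 0 + min st.2.1 (st.2.2 + M)
        (costNY', costSF', costNY'))
      (x, y, x)
    = (let v := L.foldl (fun v i => pvAct (pvDay NY SF M i) v) ((x, y) : Int × Int)
       (v.1, v.2, v.1)) := by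
  induction L generalizing x y with
  | nil => simp
  | cons i L ih =>
    simp only [List.foldl_cons]
    rw [ih]
    have : pvAct (pvDay NY SF M i) (x, y)
        = (PySem.List.pyGetD NY i 0 + min x (y + M), PySem.List.pyGetD SF i 0 + min y (x + M)) := by
      simp only [pvAct, pvDay, Prod.mk.injEq]
      constructor <;> omega
    simp [this]

-- ===== VERDICT (by name: the statement is the Claim_ definition above) =====
theorem costOfOptimalPlan_spec : Claim_equal_costOfOptimalPlan := by
  intro NY SF M n _ _
  unfold Spec_costOfOptimalPlan costOfOptimalPlan costOfOptimalPlan_alt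
  simp only [pvAloop]
  by_cases hn : n ≤ 1
  · rw [PySem.List.pyRange_one_eq_nil (by omega)]
    simp [hn]
  · rw [if_neg hn]
    have hs := pvSolve_act NY SF M 1 n
      (PySem.List.pyGetD NY 0 0, PySem.List.pyGetD SF 0 0) (by omega)
    simp only [pvEvolve] at hs
    rw [← hs]
    simp only [pvAct]
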